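-- pv_equiv track=rewrite | github.com/thinkSharp/interviewsBit | min_length_sub_string.py | min_length_substring
-- ===== SOURCE A (Python) =====
-- from collections import defaultdict, Counter
--
-- def min_length_substring(s,t):
--     char_index_map = defaultdict(list)
--     min_index, max_index = len(s), 0
--     t_char_count = Counter(t)
--     s_char_count = Counter(s)
--
--     for index, ch in enumerate(s):
--         char_index_map[ch].append(index)
--
--     for ch in t:
--         indexes = char_index_map[ch]
--         if not indexes or t_char_count[ch] > s_char_count[ch]:
--             return -1
--
--         ch_index = min(indexes)
--         min_index = min(min_index, ch_index)
--         max_index = max(max_index, ch_index)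
--
--         if t_char_count[ch] > 1:
--             ch_index = max(indexes)
--             max_index = max(max_index, ch_index)
--
--     return max_index - min_index + 1
-- ===== SOURCE B (Python) =====
-- from collections import Counter
--
-- def min_length_substring(s, t):
--     need = Counter(t)
--     have = Counter(s)
--     for ch, cnt in need.items():
--         if have[ch] < cnt:
--             return -1
--     lo, hi = len(s), 0
--     seen = set()
--     for i, ch in enumerate(s):
--         cnt = need[ch]
--         if cnt == 0:
--             continue
--         if ch not in seen:
--             seen.add(ch)
--             lo = min(lo, i)
--             hi = max(hi, i)
--         if cnt > 1:
--             hi = max(hi, i)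
--     return hi - lo + 1
-- ===== Notes on version B (the rewrite author's own statement) =====
-- stated objective: faster
-- what changed: B never builds A's char->index-list map: it checks feasibility by comparing the two Counters and then accumulates lo/hi in a single forward scan over s with a seen-set (an index contributes to hi iff it is a first occurrence or its char repeats in t), instead of A's loop over t taking min()/max() of each char's full occurrence list.
import Mathlib
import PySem

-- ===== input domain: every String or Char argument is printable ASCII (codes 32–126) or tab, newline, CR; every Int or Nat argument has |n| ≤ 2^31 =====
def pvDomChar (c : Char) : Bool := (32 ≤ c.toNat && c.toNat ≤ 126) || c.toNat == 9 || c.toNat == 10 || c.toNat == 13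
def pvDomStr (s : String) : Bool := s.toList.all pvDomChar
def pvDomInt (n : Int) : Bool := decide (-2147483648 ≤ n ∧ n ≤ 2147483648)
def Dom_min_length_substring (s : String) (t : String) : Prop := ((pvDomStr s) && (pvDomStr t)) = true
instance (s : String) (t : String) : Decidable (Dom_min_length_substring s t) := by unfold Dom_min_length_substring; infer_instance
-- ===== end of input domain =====

-- B replaces A's char->occurrence-index-list map and its per-char-of-t min()/max() scans by a
-- Counter feasibility check followed by a single forward scan over s with a seen-set that
-- accumulates lo/hi directly (objective: faster; asymptotic, O(|s|+|t|) vs O(|s|*|t|) worst case).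

-- ===== PORT A =====
-- loop 'for ch in t' of A, threading min_index/max_index
def pvLoopA (cim : PySem.Dict Char (List Int)) (tc sc : PySem.Dict Char Int) :
    Int → Int → List Char → Int
  | minI, maxI, [] => maxI - minI + 1
  | minI, maxI, ch :: rest =>
    let indexes := cim.getD ch []
    if indexes = [] ∨ tc.getD ch 0 > sc.getD ch 0 then -1
    else
      let chIdx := (PySem.List.min? indexes (fun x => x)).getD 0
      let minI' := min minI chIdx
      let maxI' := max maxI chIdx
      if tc.getD ch 0 > 1 then
        let chIdx2 := (PySem.List.max? indexes (fun x => x)).getD 0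
        pvLoopA cim tc sc minI' (max maxI' chIdx2) rest
      else
        pvLoopA cim tc sc minI' maxI' rest

def min_length_substring (s : String) (t : String) : Int :=
  let cim := (PySem.List.enumerate s.toList 0).foldl
      (fun d p => d.modify p.2 [] (fun xs => xs ++ [p.1])) PySem.Dict.empty
  let tc := PySem.Dict.counter t.toList
  let sc := PySem.Dict.counter s.toList
  pvLoopA cim tc sc (s.toList.length : Int) 0 t.toList

-- ===== PORT B =====
-- body of B's 'for i, ch in enumerate(s)' loop, threading (lo, hi, seen)
def pvStepB (need : PySem.Dict Char Int)
    (st : Int × Int × PySem.Set Char) (p : Int × Char) : Int × Int × PySem.Set Char :=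
  let cnt := need.getD p.2 0
  if cnt = 0 then st
  else
    let st1 := if PySem.Set.contains st.2.2 p.2 then st
               else (min st.1 p.1, max st.2.1 p.1, PySem.Set.add st.2.2 p.2)
    if 1 < cnt then (st1.1, max st1.2.1 p.1, st1.2.2) else st1

def min_length_substring_alt (s : String) (t : String) : Int :=
  let need := PySem.Dict.counter t.toList
  let haveC := PySem.Dict.counter s.toList
  -- 'for ch, cnt in need.items(): if have[ch] < cnt: return -1'
  if need.items.any (fun p => decide (haveC.getD p.1 0 < p.2)) then -1
  else
    let st := (PySem.List.enumerate s.toList 0).foldl (pvStepB need)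
      ((s.toList.length : Int), 0, PySem.Set.empty)
    st.2.1 - st.1 + 1

-- ===== PRECONDITION & SPEC =====
def Spec_min_length_substring (s : String) (t : String) (out : Int) : Prop := out = min_length_substring_alt s t
instance (s : String) (t : String) (out : Int) : Decidable (Spec_min_length_substring s t out) := by unfold Spec_min_length_substring; infer_instance

-- ===== CLAIM (what is proved, stated in full; the proofs are below) =====
def Claim_equal_min_length_substring : Prop := ∀ (s : String) (t : String), Dom_min_length_substring s t → Spec_min_length_substring s t (min_length_substring s t)

-- ===== LEMMAS AND PROOFS =====

-- occurrence indices of ch in an enumerated list / in s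
def pvOccE (E : List (Int × Char)) (c : Char) : List Int :=
  (E.filter (fun p => p.2 == c)).map (fun p => p.1)

def pvOcc (L : List Char) (c : Char) : List Int := pvOccE (PySem.List.enumerate L 0) c

def pvFst (L : List Char) (ch : Char) : Int := (pvOcc L ch).head?.getD 0
def pvLst (L : List Char) (ch : Char) : Int := (pvOcc L ch).getLast?.getD 0
def pvBad (L T : List Char) (ch : Char) : Bool := decide ((L.count ch : Int) < (T.count ch : Int))
def pvV (L T : List Char) (ch : Char) : Int :=
  if (1 : Int) < (T.count ch : Int) then pvLst L ch else pvFst L ch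

lemma pvOcc_sorted (L : List Char) (ch : Char) : (pvOcc L ch).Pairwise (· < ·) := by
  unfold pvOcc pvOccE
  rw [List.pairwise_map]
  exact ((PySem.List.pairwise_lt_enumerate L 0).filter _)

lemma pvOcc_length (L : List Char) (ch : Char) : (pvOcc L ch).length = L.count ch := by
  unfold pvOcc pvOccE
  rw [List.length_map, ← List.countP_eq_length_filter, List.count_eq_countP]
  conv_rhs => rw [← PySem.List.map_snd_enumerate L 0]
  rw [List.countP_map]
  rfl

lemma pvOcc_nil_iff (L : List Char) (ch : Char) : pvOcc L ch = [] ↔ L.count ch = 0 := by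
  rw [← List.length_eq_zero_iff, pvOcc_length]

lemma pvFst_le_pvLst (L : List Char) (ch : Char) (h : pvOcc L ch ≠ []) :
    pvFst L ch ≤ pvLst L ch := by
  have hs := pvOcc_sorted L ch
  unfold pvFst pvLst
  obtain ⟨a, r, har⟩ := List.exists_cons_of_ne_nil h
  rw [har] at hs
  rw [har]
  simp only [List.head?_cons, Option.getD_some]
  cases hl : (a :: r).getLast? with
  | none => simp at hl
  | some x =>
    have hx := List.mem_of_getLast? hl
    simp only [Option.getD_some]
    rcases List.mem_cons.mp hx with rfl | hx'
    · exact le_refl _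
    · exact le_of_lt (List.rel_of_pairwise_cons hs hx')

lemma pvMem_le_getLast : ∀ (l : List Int), l.Pairwise (· < ·) →
    ∀ x ∈ l, ∃ y, l.getLast? = some y ∧ x ≤ y := by
  intro l
  induction l with
  | nil => intro _ x hx; cases hx
  | cons a r ih =>
    intro hs x hx
    cases r with
    | nil =>
      simp only [List.mem_singleton] at hx
      exact ⟨a, by simp, le_of_eq hx⟩
    | cons b r' =>
      rw [List.getLast?_cons_cons]
      rcases List.mem_cons.mp hx with rfl | hx'
      · obtain ⟨y, hy, hby⟩ := ih (List.pairwise_cons.mp hs).2 b List.mem_cons_self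
        exact ⟨y, hy, le_trans (le_of_lt (List.rel_of_pairwise_cons hs List.mem_cons_self)) hby⟩
      · exact ih (List.pairwise_cons.mp hs).2 x hx'

lemma pvMem_le_pvLst (L : List Char) (ch : Char) (x : Int) (hx : x ∈ pvOcc L ch) :
    x ≤ pvLst L ch := by
  obtain ⟨y, hy, hxy⟩ := pvMem_le_getLast (pvOcc L ch) (pvOcc_sorted L ch) x hx
  unfold pvLst
  rw [hy]
  exact hxy

def pvMinStep (acc : Option Int) (x : Int) : Option Int :=
  match acc with
  | none => some x
  | some m => if x < m then some x else some m

def pvMaxStep (acc : Option Int) (x : Int) : Option Int :=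
  match acc with
  | none => some x
  | some m => if m < x then some x else some m

lemma pvMin?_eq_foldl (l : List Int) : PySem.List.min? l (fun x => x) = l.foldl pvMinStep none := by
  unfold PySem.List.min?
  congr 1
  funext acc x
  cases acc <;> rfl

lemma pvMax?_eq_foldl (l : List Int) : PySem.List.max? l (fun x => x) = l.foldl pvMaxStep none := by
  unfold PySem.List.max?
  congr 1
  funext acc x
  cases acc <;> rfl

lemma pvMinStep_go (l : List Int) (m : Int) (hm : ∀ x ∈ l, m < x) :
    l.foldl pvMinStep (some m) = some m := by
  induction l generalizing m with
  | nil => rfl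
  | cons x l ih =>
    simp only [List.foldl_cons]
    have hx := hm x List.mem_cons_self
    have hstep : pvMinStep (some m) x = some m := by
      unfold pvMinStep
      simp only
      rw [if_neg (by omega)]
    rw [hstep]
    exact ih m (fun y hy => hm y (List.mem_cons_of_mem _ hy))

lemma pvMaxStep_go (l : List Int) :
    l.Pairwise (· < ·) → ∀ (m : Int), (∀ x ∈ l, m < x) →
      l.foldl pvMaxStep (some m) = some (l.getLastD m) := by
  induction l with
  | nil => intro _ m _; rfl
  | cons x l ih =>
    intro hs m hm
    simp only [List.foldl_cons, List.getLastD_cons]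
    have hx := hm x List.mem_cons_self
    have hstep : pvMaxStep (some m) x = some x := by
      unfold pvMaxStep
      simp only
      rw [if_pos hx]
    rw [hstep]
    exact ih (List.pairwise_cons.mp hs).2 x (fun y hy => List.rel_of_pairwise_cons hs hy)

lemma pvMin?_sorted (l : List Int) (hs : l.Pairwise (· < ·)) :
    PySem.List.min? l (fun x => x) = l.head? := by
  cases l with
  | nil => rfl
  | cons a r =>
    rw [pvMin?_eq_foldl, List.foldl_cons, List.head?_cons]
    have h0 : pvMinStep none a = some a := rfl
    rw [h0]
    exact pvMinStep_go r a (fun x hx => List.rel_of_pairwise_cons hs hx)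

lemma pvMax?_sorted (l : List Int) (hs : l.Pairwise (· < ·)) :
    PySem.List.max? l (fun x => x) = l.getLast? := by
  cases l with
  | nil => rfl
  | cons a r =>
    rw [pvMax?_eq_foldl, List.foldl_cons]
    have h0 : pvMaxStep none a = some a := rfl
    rw [h0, pvMaxStep_go r (List.pairwise_cons.mp hs).2 a
      (fun x hx => List.rel_of_pairwise_cons hs hx)]
    rw [List.getLast?_cons, List.getLastD_eq_getLast?]

-- A's char_index_map
lemma pvCim_getD (L : List Char) (ch : Char) :
    ((PySem.List.enumerate L 0).foldl
        (fun d p => d.modify p.2 [] (fun xs => xs ++ [p.1])) PySem.Dict.empty).getD ch []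
      = pvOcc L ch := by
  have h : (PySem.List.enumerate L 0).foldl
        (fun d p => d.modify p.2 [] (fun xs => xs ++ [p.1])) PySem.Dict.empty
      = ((PySem.List.enumerate L 0).map (fun p => (p.2, p.1))).foldl
        (fun d q => d.modify q.1 [] (fun xs => xs ++ [q.2])) PySem.Dict.empty := by
    rw [List.foldl_map]
  rw [h, PySem.Dict.getD_foldl_modify_append, List.filter_map]
  unfold pvOcc pvOccE
  simp [Function.comp_def]

-- ---- generic fold min/max over lists, determined by mutual domination ----

lemma pvFoldMin_le {α : Type} (f : α → Int) (T : List α) (a : Int) :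
    T.foldl (fun m c => min m (f c)) a ≤ a ∧ ∀ c ∈ T, T.foldl (fun m c => min m (f c)) a ≤ f c := by
  induction T generalizing a with
  | nil => simp
  | cons x T ih =>
    simp only [List.foldl_cons]
    obtain ⟨h1, h2⟩ := ih (min a (f x))
    exact ⟨le_trans h1 (min_le_left _ _),
      fun c hc => by
        rcases List.mem_cons.mp hc with rfl | hc
        · exact le_trans h1 (min_le_right _ _)
        · exact h2 c hc⟩

lemma pvFoldMin_mem {α : Type} (f : α → Int) (T : List α) (a : Int) :
    T.foldl (fun m c => min m (f c)) a = a ∨ ∃ c ∈ T, T.foldl (fun m c => min m (f c)) a = f c := by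
  induction T generalizing a with
  | nil => simp
  | cons x T ih =>
    simp only [List.foldl_cons]
    rcases ih (min a (f x)) with h | ⟨c, hc, h⟩
    · rcases min_cases a (f x) with ⟨he, _⟩ | ⟨he, _⟩
      · left; rw [h, he]
      · right; exact ⟨x, List.mem_cons_self, by rw [h, he]⟩
    · right; exact ⟨c, List.mem_cons_of_mem _ hc, h⟩

lemma pvFoldMax_le {α : Type} (f : α → Int) (T : List α) (a : Int) :
    a ≤ T.foldl (fun m c => max m (f c)) a ∧ ∀ c ∈ T, f c ≤ T.foldl (fun m c => max m (f c)) a := by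
  induction T generalizing a with
  | nil => simp
  | cons x T ih =>
    simp only [List.foldl_cons]
    obtain ⟨h1, h2⟩ := ih (max a (f x))
    exact ⟨le_trans (le_max_left _ _) h1,
      fun c hc => by
        rcases List.mem_cons.mp hc with rfl | hc
        · exact le_trans (le_max_right _ _) h1
        · exact h2 c hc⟩

lemma pvFoldMax_mem {α : Type} (f : α → Int) (T : List α) (a : Int) :
    T.foldl (fun m c => max m (f c)) a = a ∨ ∃ c ∈ T, T.foldl (fun m c => max m (f c)) a = f c := by
  induction T generalizing a with
  | nil => simp
  | cons x T ih =>
    simp only [List.foldl_cons]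
    rcases ih (max a (f x)) with h | ⟨c, hc, h⟩
    · rcases max_cases a (f x) with ⟨he, _⟩ | ⟨he, _⟩
      · left; rw [h, he]
      · right; exact ⟨x, List.mem_cons_self, by rw [h, he]⟩
    · right; exact ⟨c, List.mem_cons_of_mem _ hc, h⟩

lemma pvFoldMin_eq2 {α β : Type} (f : α → Int) (g : β → Int) (l₁ : List α) (l₂ : List β) (a : Int)
    (h₁ : ∀ x ∈ l₁, ∃ c ∈ l₂, g c ≤ f x) (h₂ : ∀ c ∈ l₂, ∃ x ∈ l₁, f x ≤ g c) :
    l₁.foldl (fun m x => min m (f x)) a = l₂.foldl (fun m c => min m (g c)) a := by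
  apply le_antisymm
  · rcases pvFoldMin_mem g l₂ a with he | ⟨c, hc, he⟩
    · rw [he]; exact (pvFoldMin_le f l₁ a).1
    · rw [he]
      obtain ⟨x, hx, hle⟩ := h₂ c hc
      exact le_trans ((pvFoldMin_le f l₁ a).2 x hx) hle
  · rcases pvFoldMin_mem f l₁ a with he | ⟨x, hx, he⟩
    · rw [he]; exact (pvFoldMin_le g l₂ a).1
    · rw [he]
      obtain ⟨c, hc, hle⟩ := h₁ x hx
      exact le_trans ((pvFoldMin_le g l₂ a).2 c hc) hle

lemma pvFoldMax_eq2 {α β : Type} (f : α → Int) (g : β → Int) (l₁ : List α) (l₂ : List β) (a : Int)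
    (h₁ : ∀ x ∈ l₁, ∃ c ∈ l₂, f x ≤ g c) (h₂ : ∀ c ∈ l₂, ∃ x ∈ l₁, g c ≤ f x) :
    l₁.foldl (fun m x => max m (f x)) a = l₂.foldl (fun m c => max m (g c)) a := by
  apply le_antisymm
  · rcases pvFoldMax_mem f l₁ a with he | ⟨x, hx, he⟩
    · rw [he]; exact (pvFoldMax_le g l₂ a).1
    · rw [he]
      obtain ⟨c, hc, hle⟩ := h₁ x hx
      exact le_trans hle ((pvFoldMax_le g l₂ a).2 c hc)
  · rcases pvFoldMax_mem g l₂ a with he | ⟨c, hc, he⟩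
    · rw [he]; exact (pvFoldMax_le f l₁ a).1
    · rw [he]
      obtain ⟨x, hx, hle⟩ := h₂ c hc
      exact le_trans hle ((pvFoldMax_le f l₁ a).2 x hx)

-- ---- A's loop reduces to the canonical form ----

lemma pvLoopA_eq (L T : List Char) (rest : List Char) (hsub : ∀ c ∈ rest, c ∈ T) :
    ∀ (mn mx : Int),
    pvLoopA
      ((PySem.List.enumerate L 0).foldl
        (fun d p => d.modify p.2 [] (fun xs => xs ++ [p.1])) PySem.Dict.empty)
      (PySem.Dict.counter T) (PySem.Dict.counter L) mn mx rest
      = if rest.any (pvBad L T) then -1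
        else (rest.foldl (fun m c => max m (pvV L T c)) mx)
              - (rest.foldl (fun m c => min m (pvFst L c)) mn) + 1 := by
  induction rest with
  | nil => intro mn mx; simp [pvLoopA]
  | cons ch rest ih =>
    intro mn mx
    have hch : ch ∈ T := hsub ch List.mem_cons_self
    have hsub' : ∀ c ∈ rest, c ∈ T := fun c hc => hsub c (List.mem_cons_of_mem _ hc)
    rw [pvLoopA]
    simp only [pvCim_getD, PySem.Dict.getD_counter]
    by_cases hbad : pvBad L T ch = true
    · rw [if_pos]
      · simp [hbad]
      · unfold pvBad at hbad
        right
        exact of_decide_eq_true hbad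
    · have hnb : ¬ ((L.count ch : Int) < (T.count ch : Int)) := fun h => hbad (decide_eq_true h)
      have hTpos : 0 < T.count ch := List.count_pos_iff.mpr hch
      have hocc : pvOcc L ch ≠ [] := by
        intro h0
        have := (pvOcc_nil_iff L ch).mp h0
        omega
      rw [if_neg (fun h => h.elim hocc hnb)]
      have hmin : (PySem.List.min? (pvOcc L ch) (fun x => x)).getD 0 = pvFst L ch := by
        rw [pvMin?_sorted _ (pvOcc_sorted L ch)]; rfl
      have hmax : (PySem.List.max? (pvOcc L ch) (fun x => x)).getD 0 = pvLst L ch := by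
        rw [pvMax?_sorted _ (pvOcc_sorted L ch)]; rfl
      simp only [hmin, hmax]
      have hany : (ch :: rest).any (pvBad L T) = rest.any (pvBad L T) := by
        simp [hbad]
      rw [hany] at *
      by_cases hgt : ((T.count ch : Int) > 1)
      · rw [if_pos hgt, ih hsub']
        have hstep : max (max mx (pvFst L ch)) (pvLst L ch) = max mx (pvV L T ch) := by
          unfold pvV
          rw [if_pos hgt]
          have := pvFst_le_pvLst L ch hocc
          omega
        simp only [List.foldl_cons, hstep]
      · rw [if_neg hgt, ih hsub']
        have hstep : max mx (pvFst L ch) = max mx (pvV L T ch) := by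
          unfold pvV
          rw [if_neg hgt]
        simp only [List.foldl_cons, hstep]

-- ---- B's scan reduces to folds over contribution index lists ----

-- (firsts, his): indices contributing to lo (first occurrences of needed chars) and to hi
-- (first occurrences, plus every occurrence of a char needed more than once)
def pvScanSpec (need : PySem.Dict Char Int) :
    List (Int × Char) → PySem.Set Char → List Int × List Int
  | [], _ => ([], [])
  | (i, ch) :: rest, seen =>
    let cnt := need.getD ch 0
    if cnt = 0 then pvScanSpec need rest seen
    else if PySem.Set.contains seen ch then
      let r := pvScanSpec need rest seen
      (r.1, if 1 < cnt then i :: r.2 else r.2)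
    else
      let r := pvScanSpec need rest (PySem.Set.add seen ch)
      (i :: r.1, i :: r.2)

lemma pvScan_eq (need : PySem.Dict Char Int) :
    ∀ (E : List (Int × Char)) (seen : PySem.Set Char) (lo hi : Int),
    (E.foldl (pvStepB need) (lo, hi, seen)).1 = (pvScanSpec need E seen).1.foldl min lo ∧
    (E.foldl (pvStepB need) (lo, hi, seen)).2.1 = (pvScanSpec need E seen).2.foldl max hi := by
  intro E
  induction E with
  | nil => intro seen lo hi; exact ⟨rfl, rfl⟩
  | cons p rest ih =>
    intro seen lo hi
    obtain ⟨i, ch⟩ := p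
    simp only [List.foldl_cons, pvScanSpec, pvStepB]
    by_cases hc0 : need.getD ch 0 = 0
    · simp only [hc0, if_true]
      simpa using ih seen lo hi
    · rw [if_neg hc0, if_neg hc0]
      by_cases hsn : PySem.Set.contains seen ch = true
      · simp only [hsn, if_true]
        by_cases hgt : 1 < need.getD ch 0
        · simp only [if_pos hgt]
          have := ih seen lo (max hi i)
          simpa [List.foldl_cons] using this
        · simp only [if_neg hgt]
          exact ih seen lo hi
      · simp only [Bool.not_eq_true] at hsn
        have hsn' : ¬ (PySem.Set.contains seen ch = true) := by rw [hsn]; exact Bool.false_ne_true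
        simp only [if_neg hsn']
        by_cases hgt : 1 < need.getD ch 0
        · simp only [if_pos hgt]
          have hmx : max (max hi i) i = max hi i := by omega
          simpa [List.foldl_cons, hmx] using ih (PySem.Set.add seen ch) (min lo i) (max hi i)
        · simp only [if_neg hgt]
          simpa [List.foldl_cons] using ih (PySem.Set.add seen ch) (min lo i) (max hi i)

lemma pvOccE_cons (i : Int) (ch c : Char) (E : List (Int × Char)) :
    pvOccE ((i, ch) :: E) c = if ch = c then i :: pvOccE E c else pvOccE E c := by
  unfold pvOccE
  by_cases h : ch = c
  · simp [h]
  · simp [h]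

lemma pvContains_add (seen : PySem.Set Char) (ch c : Char) (hne : c ≠ ch) :
    PySem.Set.contains (PySem.Set.add seen ch) c = PySem.Set.contains seen c := by
  rw [Bool.eq_iff_iff, PySem.Set.contains_iff, PySem.Set.contains_iff, PySem.Set.mem_add]
  constructor
  · rintro (h | h)
    · exact h
    · exact absurd h hne
  · intro h; left; exact h

lemma pvContains_add_self (seen : PySem.Set Char) (ch : Char) :
    PySem.Set.contains (PySem.Set.add seen ch) ch = true := by
  rw [PySem.Set.contains_iff, PySem.Set.mem_add]
  right; rfl

lemma pvMem_scanSpec_fst (need : PySem.Dict Char Int) :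
    ∀ (E : List (Int × Char)) (seen : PySem.Set Char) (x : Int),
    x ∈ (pvScanSpec need E seen).1 ↔
      ∃ c, need.getD c 0 ≠ 0 ∧ PySem.Set.contains seen c = false ∧
        (pvOccE E c).head? = some x := by
  intro E
  induction E with
  | nil =>
    intro seen x
    simp [pvScanSpec, pvOccE]
  | cons p rest ih =>
    intro seen x
    obtain ⟨i, ch⟩ := p
    simp only [pvScanSpec]
    by_cases hc0 : need.getD ch 0 = 0
    · simp only [hc0, if_true]
      rw [ih seen x]
      constructor
      · rintro ⟨c, h1, h2, h3⟩
        refine ⟨c, h1, h2, ?_⟩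
        rw [pvOccE_cons, if_neg (fun he => h1 (by rw [← he]; exact hc0))]
        exact h3
      · rintro ⟨c, h1, h2, h3⟩
        refine ⟨c, h1, h2, ?_⟩
        rw [pvOccE_cons, if_neg (fun he => h1 (by rw [← he]; exact hc0))] at h3
        exact h3
    · rw [if_neg hc0]
      by_cases hsn : PySem.Set.contains seen ch = true
      · simp only [hsn, if_true]
        rw [ih seen x]
        constructor
        · rintro ⟨c, h1, h2, h3⟩
          have hne : ch ≠ c := fun he => by rw [← he] at h2; rw [hsn] at h2; exact absurd h2 (by decide)
          exact ⟨c, h1, h2, by rw [pvOccE_cons, if_neg hne]; exact h3⟩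
        · rintro ⟨c, h1, h2, h3⟩
          have hne : ch ≠ c := fun he => by rw [← he] at h2; rw [hsn] at h2; exact absurd h2 (by decide)
          rw [pvOccE_cons, if_neg hne] at h3
          exact ⟨c, h1, h2, h3⟩
      · simp only [Bool.not_eq_true] at hsn
        have hsn' : ¬ (PySem.Set.contains seen ch = true) := by rw [hsn]; exact Bool.false_ne_true
        rw [if_neg hsn']
        simp only [List.mem_cons]
        rw [ih (PySem.Set.add seen ch) x]
        constructor
        · rintro (rfl | ⟨c, h1, h2, h3⟩)
          · exact ⟨ch, hc0, hsn, by rw [pvOccE_cons, if_pos rfl]; rfl⟩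
          · have hne : c ≠ ch := fun he => by
              rw [he, pvContains_add_self] at h2; exact absurd h2 (by decide)
            refine ⟨c, h1, ?_, ?_⟩
            · rw [← pvContains_add seen ch c hne]; exact h2
            · rw [pvOccE_cons, if_neg (fun he => hne he.symm)]; exact h3
        · rintro ⟨c, h1, h2, h3⟩
          by_cases he : ch = c
          · subst he
            rw [pvOccE_cons, if_pos rfl] at h3
            simp only [List.head?_cons, Option.some.injEq] at h3
            exact Or.inl h3.symm
          · right
            refine ⟨c, h1, ?_, ?_⟩
            · rw [pvContains_add seen ch c (fun h => he h.symm)]; exact h2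
            · rw [pvOccE_cons, if_neg he] at h3; exact h3

lemma pvMem_scanSpec_snd (need : PySem.Dict Char Int) :
    ∀ (E : List (Int × Char)) (seen : PySem.Set Char) (x : Int),
    x ∈ (pvScanSpec need E seen).2 ↔
      ∃ c, need.getD c 0 ≠ 0 ∧
        ((1 < need.getD c 0 ∧ x ∈ pvOccE E c) ∨
         (PySem.Set.contains seen c = false ∧ (pvOccE E c).head? = some x)) := by
  intro E
  induction E with
  | nil =>
    intro seen x
    simp [pvScanSpec, pvOccE]
  | cons p rest ih =>
    intro seen x
    obtain ⟨i, ch⟩ := p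
    simp only [pvScanSpec]
    by_cases hc0 : need.getD ch 0 = 0
    · simp only [hc0, if_true]
      rw [ih seen x]
      constructor
      · rintro ⟨c, h1, h⟩
        have hne : ch ≠ c := fun he => h1 (by rw [← he]; exact hc0)
        exact ⟨c, h1, by rw [pvOccE_cons, if_neg hne]; exact h⟩
      · rintro ⟨c, h1, h⟩
        have hne : ch ≠ c := fun he => h1 (by rw [← he]; exact hc0)
        rw [pvOccE_cons, if_neg hne] at h
        exact ⟨c, h1, h⟩
    · rw [if_neg hc0]
      by_cases hsn : PySem.Set.contains seen ch = true
      · simp only [hsn, if_true]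
        by_cases hgt : 1 < need.getD ch 0
        · simp only [if_pos hgt, List.mem_cons]
          rw [ih seen x]
          constructor
          · rintro (rfl | ⟨c, h1, h⟩)
            · exact ⟨ch, hc0, Or.inl ⟨hgt, by rw [pvOccE_cons, if_pos rfl]; exact List.mem_cons_self⟩⟩
            · by_cases he : ch = c
              · subst he
                rcases h with ⟨hg, hm⟩ | ⟨hf, _⟩
                · exact ⟨ch, hc0, Or.inl ⟨hg, by rw [pvOccE_cons, if_pos rfl]; exact List.mem_cons_of_mem _ hm⟩⟩
                · rw [hsn] at hf; exact absurd hf (by decide)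
              · exact ⟨c, h1, by rw [pvOccE_cons, if_neg he]; exact h⟩
          · rintro ⟨c, h1, h⟩
            by_cases he : ch = c
            · subst he
              rw [pvOccE_cons, if_pos rfl] at h
              rcases h with ⟨hg, hm⟩ | ⟨hf, _⟩
              · rcases List.mem_cons.mp hm with rfl | hm'
                · exact Or.inl rfl
                · exact Or.inr ⟨ch, hc0, Or.inl ⟨hg, hm'⟩⟩
              · rw [hsn] at hf; exact absurd hf (by decide)
            · rw [pvOccE_cons, if_neg he] at h
              exact Or.inr ⟨c, h1, h⟩
        · simp only [if_neg hgt]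
          rw [ih seen x]
          constructor
          · rintro ⟨c, h1, h⟩
            have hne : ch ≠ c := by
              intro he; subst he
              rcases h with ⟨hg, _⟩ | ⟨hf, _⟩
              · exact hgt hg
              · rw [hsn] at hf; exact absurd hf (by decide)
            exact ⟨c, h1, by rw [pvOccE_cons, if_neg hne]; exact h⟩
          · rintro ⟨c, h1, h⟩
            by_cases he : ch = c
            · subst he
              rw [pvOccE_cons, if_pos rfl] at h
              rcases h with ⟨hg, _⟩ | ⟨hf, _⟩
              · exact absurd hg hgt
              · rw [hsn] at hf; exact absurd hf (by decide)
            · rw [pvOccE_cons, if_neg he] at h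
              exact ⟨c, h1, h⟩
      · simp only [Bool.not_eq_true] at hsn
        have hsn' : ¬ (PySem.Set.contains seen ch = true) := by rw [hsn]; exact Bool.false_ne_true
        rw [if_neg hsn']
        simp only [List.mem_cons]
        rw [ih (PySem.Set.add seen ch) x]
        constructor
        · rintro (rfl | ⟨c, h1, h⟩)
          · exact ⟨ch, hc0, Or.inr ⟨hsn, by rw [pvOccE_cons, if_pos rfl]; rfl⟩⟩
          · by_cases he : ch = c
            · subst he
              rcases h with ⟨hg, hm⟩ | ⟨hf, _⟩
              · exact ⟨ch, hc0, Or.inl ⟨hg, by rw [pvOccE_cons, if_pos rfl]; exact List.mem_cons_of_mem _ hm⟩⟩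
              · rw [pvContains_add_self] at hf; exact absurd hf (by decide)
            · refine ⟨c, h1, ?_⟩
              rw [pvOccE_cons, if_neg he]
              rcases h with ⟨hg, hm⟩ | ⟨hf, hh⟩
              · exact Or.inl ⟨hg, hm⟩
              · rw [pvContains_add seen ch c (fun hx => he hx.symm)] at hf
                exact Or.inr ⟨hf, hh⟩
        · rintro ⟨c, h1, h⟩
          by_cases he : ch = c
          · subst he
            rw [pvOccE_cons, if_pos rfl] at h
            rcases h with ⟨hg, hm⟩ | ⟨_, hh⟩
            · rcases List.mem_cons.mp hm with rfl | hm'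
              · exact Or.inl rfl
              · exact Or.inr ⟨ch, hc0, Or.inl ⟨hg, hm'⟩⟩
            · simp only [List.head?_cons, Option.some.injEq] at hh
              exact Or.inl hh.symm
          · rw [pvOccE_cons, if_neg he] at h
            rcases h with ⟨hg, hm⟩ | ⟨hf, hh⟩
            · exact Or.inr ⟨c, h1, Or.inl ⟨hg, hm⟩⟩
            · refine Or.inr ⟨c, h1, Or.inr ⟨?_, hh⟩⟩
              rw [pvContains_add seen ch c (fun hx => he hx.symm)]
              exact hf

-- head? of a nonempty occurrence list is pvFst
lemma pvHead_occ (L : List Char) (c : Char) (h : pvOcc L c ≠ []) :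
    (pvOcc L c).head? = some (pvFst L c) := by
  obtain ⟨a, r, har⟩ := List.exists_cons_of_ne_nil h
  unfold pvFst
  rw [har]
  rfl

lemma pvLst_mem_occ (L : List Char) (c : Char) (h : pvOcc L c ≠ []) :
    pvLst L c ∈ pvOcc L c := by
  unfold pvLst
  cases hl : (pvOcc L c).getLast? with
  | none => exact absurd (List.getLast?_eq_none_iff.mp hl) h
  | some x => simpa using List.mem_of_getLast? hl

-- ===== VERDICT (by name: the statement is the Claim_ definition above) =====
theorem min_length_substring_spec : Claim_equal_min_length_substring := by
  intro s t _
  unfold Spec_min_length_substring min_length_substring min_length_substring_alt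
  rw [pvLoopA_eq s.toList t.toList t.toList (fun c hc => hc)]
  -- notation
  set L := s.toList with hL
  set T := t.toList with hT
  -- the feasibility check of B equals the any-pvBad condition of A's canonical form
  have hcond : ((PySem.Dict.counter T).items.any
      (fun p => decide ((PySem.Dict.counter L).getD p.1 0 < p.2)))
      = T.any (pvBad L T) := by
    rw [PySem.Dict.items_counter, List.any_map]
    rw [Bool.eq_iff_iff]
    simp only [List.any_eq_true, Function.comp]
    constructor
    · rintro ⟨c, hc, h⟩
      refine ⟨c, (PySem.Set.mem_ofList T c).mp hc, ?_⟩
      unfold pvBad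
      rw [PySem.Dict.getD_counter] at h
      exact h
    · rintro ⟨c, hc, h⟩
      refine ⟨c, (PySem.Set.mem_ofList T c).mpr hc, ?_⟩
      unfold pvBad at h
      rw [PySem.Dict.getD_counter]
      exact h
  simp only [hcond]
  by_cases hb : T.any (pvBad L T) = true
  · rw [if_pos hb, if_pos hb]
  · rw [if_neg hb, if_neg hb]
    simp only [Bool.not_eq_true, List.any_eq_false] at hb
    -- feasibility: each char of T occurs in L
    have hfeas : ∀ c ∈ T, pvOcc L c ≠ [] ∧ ((T.count c : Int) ≤ (L.count c : Int)) := by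
      intro c hc
      have hbc := hb c hc
      unfold pvBad at hbc
      have hle : ¬ ((L.count c : Int) < (T.count c : Int)) := by
        intro h; rw [decide_eq_true h] at hbc; exact absurd hbc (by decide)
      have hTpos : 0 < T.count c := List.count_pos_iff.mpr hc
      refine ⟨?_, by omega⟩
      intro h0
      have := (pvOcc_nil_iff L c).mp h0
      omega
    obtain ⟨h1, h2⟩ := pvScan_eq (PySem.Dict.counter T) (PySem.List.enumerate L 0)
      PySem.Set.empty (L.length : Int) 0
    rw [h1, h2]
    -- membership facts specialized to seen = ∅, tc = counter T
    have hneed : ∀ c : Char, (PySem.Dict.counter T).getD c 0 = (T.count c : Int) :=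
      fun c => PySem.Dict.getD_counter T c
    have hemp : ∀ c : Char, PySem.Set.contains (PySem.Set.empty : PySem.Set Char) c = false := by
      intro c; rfl
    have hmin : ((pvScanSpec (PySem.Dict.counter T) (PySem.List.enumerate L 0)
        PySem.Set.empty).1).foldl min (L.length : Int)
        = T.foldl (fun m c => min m (pvFst L c)) (L.length : Int) := by
      apply pvFoldMin_eq2 (fun x => x) (pvFst L)
      · intro x hx
        rw [pvMem_scanSpec_fst] at hx
        obtain ⟨c, hc1, _, hc3⟩ := hx
        rw [hneed c] at hc1
        have hcT : c ∈ T := by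
          by_contra h
          exact hc1 (by rw [List.count_eq_zero_of_not_mem h]; rfl)
        refine ⟨c, hcT, ?_⟩
        have : (pvOcc L c).head? = some x := hc3
        rw [pvHead_occ L c (hfeas c hcT).1] at this
        simp only [Option.some.injEq] at this
        rw [this]
      · intro c hc
        refine ⟨pvFst L c, ?_, le_refl _⟩
        rw [pvMem_scanSpec_fst]
        refine ⟨c, ?_, hemp c, ?_⟩
        · rw [hneed c]
          have := (hfeas c hc).2
          have hTpos : 0 < T.count c := List.count_pos_iff.mpr hc
          simp only [ne_eq, Int.natCast_eq_zero]
          omega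
        · exact pvHead_occ L c (hfeas c hc).1
    have hmax : ((pvScanSpec (PySem.Dict.counter T) (PySem.List.enumerate L 0)
        PySem.Set.empty).2).foldl max (0 : Int)
        = T.foldl (fun m c => max m (pvV L T c)) (0 : Int) := by
      apply pvFoldMax_eq2 (fun x => x) (pvV L T)
      · intro x hx
        rw [pvMem_scanSpec_snd] at hx
        obtain ⟨c, hc1, hd⟩ := hx
        rw [hneed c] at hc1
        have hcT : c ∈ T := by
          by_contra h
          exact hc1 (by rw [List.count_eq_zero_of_not_mem h]; rfl)
        refine ⟨c, hcT, ?_⟩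
        rcases hd with ⟨hg, hm⟩ | ⟨_, hh⟩
        · rw [hneed c] at hg
          have : x ≤ pvLst L c := pvMem_le_pvLst L c x hm
          unfold pvV
          rw [if_pos hg]
          exact this
        · have : (pvOcc L c).head? = some x := hh
          rw [pvHead_occ L c (hfeas c hcT).1] at this
          simp only [Option.some.injEq] at this
          rw [← this]
          unfold pvV
          split_ifs with hg
          · exact pvFst_le_pvLst L c (hfeas c hcT).1
          · exact le_refl _
      · intro c hc
        refine ⟨pvV L T c, ?_, le_refl _⟩
        rw [pvMem_scanSpec_snd]
        have hne0 : (PySem.Dict.counter T).getD c 0 ≠ 0 := by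
          rw [hneed c]
          have hTpos : 0 < T.count c := List.count_pos_iff.mpr hc
          simp only [ne_eq, Int.natCast_eq_zero]
          omega
        refine ⟨c, hne0, ?_⟩
        by_cases hg : (1 : Int) < (T.count c : Int)
        · left
          refine ⟨by rw [hneed c]; exact hg, ?_⟩
          have : pvV L T c = pvLst L c := by unfold pvV; rw [if_pos hg]
          rw [this]
          exact pvLst_mem_occ L c (hfeas c hc).1
        · right
          refine ⟨hemp c, ?_⟩
          have : pvV L T c = pvFst L c := by unfold pvV; rw [if_neg hg]
          rw [this]
          exact pvHead_occ L c (hfeas c hc).1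
    rw [hmin, hmax]
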